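-- pv_equiv track=rewrite | github.com/hendrikhuwy-lgtm/Investment-Sample | backend/app/v2/surfaces/daily_brief/contract_builder.py | _strip_implementation_clause
-- ===== SOURCE A (Python) =====
-- def _strip_implementation_clause(text: str) -> str:
--     normalized = str(text or "").strip()
--     if not normalized:
--         return ""
--     for marker in (
--         " The main ETF choices are ",
--         " Main ETF choices are ",
--         " The main implementation choices are ",
--     ):
--         idx = normalized.find(marker)
--         if idx != -1:
--             normalized = normalized[:idx].strip()
--     return normalized.strip()
-- ===== SOURCE B (Python) =====
-- _MARKERS = (
--     " The main ETF choices are ",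
--     " Main ETF choices are ",
--     " The main implementation choices are ",
-- )
--
--
-- def _strip_implementation_clause(text: str) -> str:
--     normalized = str(text or "").strip()
--     if not normalized:
--         return ""
--     indices = [i for i in (normalized.find(m) for m in _MARKERS) if i != -1]
--     if indices:
--         normalized = normalized[:min(indices)]
--     return normalized.strip()
-- ===== Notes on version B (the rewrite author's own statement) =====
-- stated objective: simpler
-- what changed: Replaces A's loop that repeatedly truncates the string, re-strips it and re-searches the next marker in the mutated string by a single cut of the normalized string at the minimum of the three markers' first-occurrence indices followed by one final strip.
import Mathlib
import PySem

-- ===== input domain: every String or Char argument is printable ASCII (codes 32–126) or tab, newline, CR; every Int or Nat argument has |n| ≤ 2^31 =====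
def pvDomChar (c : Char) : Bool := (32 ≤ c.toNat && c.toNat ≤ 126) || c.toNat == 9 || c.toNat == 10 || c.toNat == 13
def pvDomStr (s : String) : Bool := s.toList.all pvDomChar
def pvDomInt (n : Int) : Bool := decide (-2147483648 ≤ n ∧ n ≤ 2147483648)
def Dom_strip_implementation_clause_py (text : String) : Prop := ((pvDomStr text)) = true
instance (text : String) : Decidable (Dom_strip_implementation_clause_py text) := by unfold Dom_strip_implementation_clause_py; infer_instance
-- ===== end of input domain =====

-- B replaces A's truncate-strip-and-re-search loop by one cut at the minimum of the
-- markers' first-occurrence indices followed by a single strip (objective: simpler).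

-- the three marker strings (shared literals of both programs)
def pvM1 : String := " The main ETF choices are "
def pvM2 : String := " Main ETF choices are "
def pvM3 : String := " The main implementation choices are "
def pvMarkers : List String := [pvM1, pvM2, pvM3]

-- ===== PORT A =====
-- one iteration of A's for-loop: find the marker, truncate and strip if present
def pvStepA (n marker : String) : String :=
  let idx := PySem.Str.find n marker
  if idx ≠ -1 then PySem.Str.strip (PySem.Str.slice n none (some idx)) else n

def strip_implementation_clause_py (text : String) : String :=
  let normalized := PySem.Str.strip (if text = "" then "" else text)
  if normalized = "" then ""
  else PySem.Str.strip (pvMarkers.foldl pvStepA normalized)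

-- ===== PORT B =====
def strip_implementation_clause_py_alt (text : String) : String :=
  let normalized := PySem.Str.strip (if text = "" then "" else text)
  if normalized = "" then ""
  else
    let indices := (pvMarkers.map (fun m => PySem.Str.find normalized m)).filter (fun i => i ≠ -1)
    let normalized :=
      if indices ≠ [] then
        PySem.Str.slice normalized none (some ((PySem.List.min? indices (fun i => i)).getD 0))
      else normalized
    PySem.Str.strip normalized

-- ===== PRECONDITION & SPEC =====
-- Pre_ excludes texts whose stripped form contains two or more of the three markers:
-- there A's sequential truncate-and-restrip makes the cut depend on the tuple order
-- and on whitespace shared between overlapping occurrences, an accidental corner on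
-- which both A's cut and B's cut at the earliest marker are defensible.
def Pre_strip_implementation_clause_py (text : String) : Prop :=
  ¬ (PySem.Str.isIn pvM1 (PySem.Str.strip text) = true ∧ PySem.Str.isIn pvM2 (PySem.Str.strip text) = true) ∧
  ¬ (PySem.Str.isIn pvM1 (PySem.Str.strip text) = true ∧ PySem.Str.isIn pvM3 (PySem.Str.strip text) = true) ∧
  ¬ (PySem.Str.isIn pvM2 (PySem.Str.strip text) = true ∧ PySem.Str.isIn pvM3 (PySem.Str.strip text) = true)
instance (text : String) : Decidable (Pre_strip_implementation_clause_py text) := by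
  unfold Pre_strip_implementation_clause_py; infer_instance

def pvWitness_strip_implementation_clause_py : String :=
  "  Buy broad equities. The main ETF choices are VTI and VOO.  "

def Spec_strip_implementation_clause_py (text : String) (out : String) : Prop := out = strip_implementation_clause_py_alt text
instance (text : String) (out : String) : Decidable (Spec_strip_implementation_clause_py text out) := by unfold Spec_strip_implementation_clause_py; infer_instance

-- ===== CLAIM (what is proved, stated in full; the proofs are below) =====
def Claim_equal_strip_implementation_clause_py : Prop := ∀ (text : String), Dom_strip_implementation_clause_py text → Pre_strip_implementation_clause_py text → Spec_strip_implementation_clause_py text (strip_implementation_clause_py text)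

-- ===== LEMMAS AND PROOFS =====

-- rstrip is a prefix of its argument
theorem pv_rstrip_prefix (cs : List Char) : PySem.Chars.rstrip cs <+: cs := by
  unfold PySem.Chars.rstrip
  simpa using List.reverse_prefix.mpr (List.dropWhile_suffix (l := cs.reverse) PySem.Chars.isspace)

-- strip yields an infix of its argument
theorem pv_strip_infix (cs : List Char) : PySem.Chars.strip cs <:+: cs := by
  unfold PySem.Chars.strip
  exact (pv_rstrip_prefix _).isInfix.trans (List.dropWhile_suffix (l := cs) PySem.Chars.isspace).isInfix

-- a prefix of an already left-stripped list is left-stripped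
theorem pv_dropWhile_eq_self_of_prefix (p : Char → Bool) (l l' : List Char)
    (h : l' <+: List.dropWhile p l) : List.dropWhile p l' = l' := by
  rw [List.dropWhile_eq_self_iff]
  intro hl hp
  have hx : (List.dropWhile p l)[0]? = some l'[0] := by
    obtain ⟨t, ht⟩ := h
    rw [← ht]
    exact (List.getElem?_append_left hl).trans (List.getElem?_eq_getElem hl)
  have h2 := List.head?_dropWhile_not p l
  rw [List.head?_eq_getElem?, hx] at h2
  simp only at h2
  rw [h2] at hp
  exact absurd hp (by simp)

-- strip is idempotent (list level)
theorem pv_strip_idem (cs : List Char) : PySem.Chars.strip (PySem.Chars.strip cs) = PySem.Chars.strip cs := by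
  unfold PySem.Chars.strip PySem.Chars.lstrip PySem.Chars.rstrip
  rw [pv_dropWhile_eq_self_of_prefix PySem.Chars.isspace cs
    ((List.dropWhile PySem.Chars.isspace ((List.dropWhile PySem.Chars.isspace cs).reverse)).reverse)
    (pv_rstrip_prefix (List.dropWhile PySem.Chars.isspace cs))]
  rw [List.reverse_reverse, List.dropWhile_idempotent]

-- strip is idempotent (string level)
theorem pv_str_strip_idem (s : String) : PySem.Str.strip (PySem.Str.strip s) = PySem.Str.strip s := by
  simp [PySem.Str.strip, pv_strip_idem]

-- a marker absent from s is absent from the stripped prefix s[:i].strip() (0 ≤ i)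
theorem pv_find_cut (s m : String) (i : Int) (hi : 0 ≤ i)
    (hm : PySem.Str.find s m = -1) :
    PySem.Str.find (PySem.Str.strip (PySem.Str.slice s none (some i))) m = -1 := by
  rw [PySem.Str.find_eq_neg_one_iff] at hm ⊢
  intro hcon
  apply hm
  have h1 : (PySem.Str.strip (PySem.Str.slice s none (some i))).toList
      <:+: (PySem.Str.slice s none (some i)).toList := by
    simp only [PySem.Str.toList_strip]
    exact pv_strip_infix _
  have h2 : (PySem.Str.slice s none (some i)).toList <:+: s.toList := by
    simp only [PySem.Str.toList_slice, PySem.Chars.slice_eq_listSlice,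
      PySem.List.slice_to _ hi]
    exact (List.take_prefix _ _).isInfix
  exact hcon.trans (h1.trans h2)

-- ===== VERDICT (by name: the statement is the Claim_ definition above) =====
theorem strip_implementation_clause_py_spec : Claim_equal_strip_implementation_clause_py := by
  intro text _hdom hpre
  unfold Spec_strip_implementation_clause_py
  unfold strip_implementation_clause_py strip_implementation_clause_py_alt
  by_cases htext : text = ""
  · subst htext; decide
  · simp only [htext, if_false]
    set n := PySem.Str.strip text with hn
    by_cases hempty : n = ""
    · simp [hempty]
    · simp only [hempty, if_false]
      obtain ⟨hp12, hp13, hp23⟩ := hpre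
      rw [← hn] at hp12 hp13 hp23
      have hiff : ∀ m : String, PySem.Chars.find n.toList m.toList ≠ -1 → PySem.Str.isIn m n = true := by
        intro m hm
        rw [PySem.Str.isIn_iff_infix]
        exact (PySem.Chars.find_ne_neg_one_iff _ _).mp hm
      by_cases h1 : PySem.Chars.find n.toList pvM1.toList = -1 <;>
      by_cases h2 : PySem.Chars.find n.toList pvM2.toList = -1 <;>
      by_cases h3 : PySem.Chars.find n.toList pvM3.toList = -1
      · -- none found
        simp [pvMarkers, pvStepA, h1, h2, h3]
      · -- only m3
        simp [pvMarkers, pvStepA, h1, h2, h3, PySem.List.min?, pv_str_strip_idem]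
      · -- only m2
        have hi2 : (0:Int) ≤ PySem.Chars.find n.toList pvM2.toList := by
          have := PySem.Chars.neg_one_le_find n.toList pvM2.toList; omega
        have hc3 := pv_find_cut n pvM3 (PySem.Str.find n pvM2) (by simpa [PySem.Str.find] using hi2) (by simpa [PySem.Str.find] using h3)
        simp only [PySem.Str.find] at hc3
        simp at hc3
        simp [pvMarkers, pvStepA, h1, h2, h3, hc3, PySem.List.min?, pv_str_strip_idem]
      · exact absurd ⟨hiff pvM2 h2, hiff pvM3 h3⟩ hp23
      · -- only m1
        have hi1 : (0:Int) ≤ PySem.Chars.find n.toList pvM1.toList := by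
          have := PySem.Chars.neg_one_le_find n.toList pvM1.toList; omega
        have hc2 := pv_find_cut n pvM2 (PySem.Str.find n pvM1) (by simpa [PySem.Str.find] using hi1) (by simpa [PySem.Str.find] using h2)
        have hc3 := pv_find_cut n pvM3 (PySem.Str.find n pvM1) (by simpa [PySem.Str.find] using hi1) (by simpa [PySem.Str.find] using h3)
        simp only [PySem.Str.find] at hc2 hc3
        simp at hc2 hc3
        simp [pvMarkers, pvStepA, h1, h2, h3, hc2, hc3, PySem.List.min?, pv_str_strip_idem]
      · exact absurd ⟨hiff pvM1 h1, hiff pvM3 h3⟩ hp13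
      · exact absurd ⟨hiff pvM1 h1, hiff pvM2 h2⟩ hp12
      · exact absurd ⟨hiff pvM1 h1, hiff pvM2 h2⟩ hp12
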